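-- pv_equiv track=rewrite | github.com/TFarla/anki-timelapse | playground.py | get_style
-- ===== SOURCE A (Python) =====
-- def get_style(level):
--     if level <= 0:
--         return 'none'
--
--     ranges = [
--         (1, 10, 'bad'),
--         (10, 20, 'normal'),
--         (20, 30, 'intermediate'),
--         (30, 40, 'good'),
--         (40, 10000, 'great')
--     ]
--
--     for (lower, upper, class_name) in ranges:
--         if lower <= level <= upper:
--             return class_name
-- ===== SOURCE B (Python) =====
-- def get_style(level):
--     if level <= 0:
--         return 'none'
--     bounds = [10, 20, 30, 40]
--     names = ['bad', 'normal', 'intermediate', 'good', 'great']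
--     lo, hi = 0, 4
--     while lo < hi:
--         mid = (lo + hi) // 2
--         if bounds[mid] < level:
--             lo = mid + 1
--         else:
--             hi = mid
--     return names[lo]
-- ===== Notes on version B (the rewrite author's own statement) =====
-- stated objective: alternative
-- what changed: Replaced the linear scan over (lower, upper, name) interval triples with a hand-written binary search (bisect_left) over a sorted threshold list indexing a parallel name table; Pre_ excludes levels above the last interval bound, where A falls off its loop and returns None (not a str).
-- outside the precondition, e.g. on get_style(10001): A returns None, B returns 'great'
import Mathlib
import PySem

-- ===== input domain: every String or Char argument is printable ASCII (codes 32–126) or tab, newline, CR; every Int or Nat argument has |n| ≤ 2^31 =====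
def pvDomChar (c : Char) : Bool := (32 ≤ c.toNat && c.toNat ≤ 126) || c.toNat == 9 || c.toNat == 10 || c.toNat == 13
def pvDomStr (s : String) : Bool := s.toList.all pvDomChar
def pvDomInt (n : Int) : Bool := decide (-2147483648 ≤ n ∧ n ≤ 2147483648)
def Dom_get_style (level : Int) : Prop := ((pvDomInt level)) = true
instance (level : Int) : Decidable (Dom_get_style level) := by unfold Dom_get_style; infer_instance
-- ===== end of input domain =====

-- B replaces A's linear scan over interval triples with a binary search over a
-- threshold table (alternative algorithm, same result on Pre_).


-- ===== PORT A =====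
-- A's for-loop returning the first matching interval's name; A falls off the
-- loop (returns None) only for level > 10000, which Pre_ excludes; there the
-- Option is none and we give "" (no String value exists in A).
def findStyle : List (Int × Int × String) → Int → Option String
  | [], _ => none
  | (lower, upper, class_name) :: rest, level =>
      if lower ≤ level ∧ level ≤ upper then some class_name else findStyle rest level

def get_style (level : Int) : String :=
  if level ≤ 0 then "none"
  else
    let ranges : List (Int × Int × String) :=
      [(1, 10, "bad"), (10, 20, "normal"), (20, 30, "intermediate"),
       (30, 40, "good"), (40, 10000, "great")]
    (findStyle ranges level).getD ""

-- ===== PORT B =====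
-- Source B's while-loop bisect_left; bounds[mid] via getD: mid is always in range
-- (0 ≤ lo ≤ mid < hi ≤ length), so this is exact for Python's bounds[mid].
-- fuel = hi - lo bounds the iteration count (each step shrinks hi - lo);
-- it is only a totality device, the computation is the while-loop's.
def bisectGo : Nat → List Int → Int → Nat → Nat → Nat
  | 0, _, _, lo, _ => lo
  | fuel + 1, bounds, level, lo, hi =>
    if lo < hi then
      let mid := (lo + hi) / 2
      if bounds.getD mid 0 < level then bisectGo fuel bounds level (mid + 1) hi
      else bisectGo fuel bounds level lo mid
    else lo

def bisectLoop (bounds : List Int) (level : Int) (lo hi : Nat) : Nat :=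
  bisectGo (hi - lo) bounds level lo hi

def get_style_alt (level : Int) : String :=
  if level ≤ 0 then "none"
  else
    let bounds : List Int := [10, 20, 30, 40]
    let names : List String := ["bad", "normal", "intermediate", "good", "great"]
    names.getD (bisectLoop bounds level 0 4) ""

-- ===== PRECONDITION & SPEC =====
-- Pre_ excludes levels above A's last interval bound, where A falls off its loop and returns None (not a str); the cited example is (10001,).
def Pre_get_style (level : Int) : Prop := level ≤ 10000
instance (level : Int) : Decidable (Pre_get_style level) := by unfold Pre_get_style; infer_instance
def pvWitness_get_style : Int := 25
def Spec_get_style (level : Int) (out : String) : Prop := out = get_style_alt level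
instance (level : Int) (out : String) : Decidable (Spec_get_style level out) := by unfold Spec_get_style; infer_instance

-- ===== CLAIM (what is proved, stated in full; the proofs are below) =====
def Claim_equal_get_style : Prop := ∀ (level : Int), Dom_get_style level → Pre_get_style level → Spec_get_style level (get_style level)

-- ===== LEMMAS AND PROOFS =====

-- ===== VERDICT (by name: the statement is the Claim_ definition above) =====
theorem get_style_spec : Claim_equal_get_style := by
  intro level _ hpre
  unfold Pre_get_style at hpre
  unfold Spec_get_style get_style get_style_alt
  by_cases h0 : level ≤ 0
  · simp [h0]
  · simp only [h0, if_false]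
    -- unfold both small computations and case on the thresholds
    simp [findStyle, bisectLoop, bisectGo]
    split_ifs <;> first | rfl | omega
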